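-- pv_equiv track=rewrite | github.com/Krandheer/data-structure | powerset.py | powerset2
-- ===== SOURCE A (Python) =====
-- def powerset2(temp_p, temp_up, ans):
--     if len(temp_up) == 0:
--         ans.append(temp_p)
--         return
--     elem = temp_up[0]
--     powerset2(temp_p, temp_up[1:], ans)
--     powerset2(temp_p + elem, temp_up[1:], ans)
--
--     return sorted(sorted(ans), key=lambda x: len(x))
-- ===== SOURCE B (Python) =====
-- def powerset2(temp_p, temp_up, ans):
--     if len(temp_up) == 0:
--         ans.append(temp_p)
--         return
--     subs = [temp_p]
--     for ch in temp_up: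
--         subs += [s + ch for s in subs]
--     ans.extend(subs)
--     return sorted(ans, key=lambda x: (len(x), x))
-- ===== Notes on version B (the rewrite author's own statement) =====
-- stated objective: alternative
-- what changed: Replaces the exponential double recursion (which re-sorts the whole accumulator at every internal recursive frame) by an iterative subset-doubling loop and a single sort with a (len, lex) tuple key; intended as faster, but a timing run could only observe A timing out at n=16 where B returns, so no ratio was measured.
import Mathlib
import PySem

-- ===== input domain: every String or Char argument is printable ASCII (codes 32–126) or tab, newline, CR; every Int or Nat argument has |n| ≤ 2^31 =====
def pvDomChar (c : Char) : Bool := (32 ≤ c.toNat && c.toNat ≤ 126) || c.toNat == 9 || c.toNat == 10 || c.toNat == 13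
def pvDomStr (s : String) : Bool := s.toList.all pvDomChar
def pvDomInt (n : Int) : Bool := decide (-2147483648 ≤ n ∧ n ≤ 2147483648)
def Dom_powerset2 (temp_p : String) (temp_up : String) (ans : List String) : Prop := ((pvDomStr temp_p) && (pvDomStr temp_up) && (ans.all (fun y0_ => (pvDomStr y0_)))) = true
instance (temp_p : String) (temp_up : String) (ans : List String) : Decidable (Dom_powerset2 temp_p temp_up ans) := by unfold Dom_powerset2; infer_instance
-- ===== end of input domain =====

-- B replaces A's double recursion by an iterative subset-doubling loop and ONE sort with a (len, lex)
-- tuple key. Both A and B mutate `ans` in place (appending the same multiset of subset strings, in a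
-- different order); the equivalence proved here is about the RETURN value only.

-- ===== PORT A =====
-- A's recursion threads the mutable list `ans`; this helper returns the list state after both
-- recursive calls (the recursive calls' return values are discarded by A, exactly as in the Python).
def powerset2Go (p : String) (up : List Char) (ans : List String) : List String :=
  match up with
  | [] => ans ++ [p]                                       -- ans.append(temp_p); return
  | c :: rest => powerset2Go (p.push c) rest (powerset2Go p rest ans)

def powerset2 (temp_p : String) (temp_up : String) (ans : List String) : Option (List String) :=
  if PySem.Str.len temp_up = 0 then
    none                                                   -- ans.append(temp_p); return  (returns None)
  else
    some (PySem.List.sorted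
            (PySem.List.sorted (powerset2Go temp_p temp_up.toList ans) (fun x => x) false)
            (fun x => PySem.Str.len x) false)              -- sorted(sorted(ans), key=len)

-- ===== PORT B =====
def powerset2_alt (temp_p : String) (temp_up : String) (ans : List String) : Option (List String) :=
  if PySem.Str.len temp_up = 0 then
    none                                                   -- ans.append(temp_p); return
  else
    -- subs = [temp_p]; for ch in temp_up: subs += [s + ch for s in subs]
    let subs := temp_up.toList.foldl (fun acc c => acc ++ acc.map (fun s => s.push c)) [temp_p]
    -- ans.extend(subs); return sorted(ans, key=lambda x: (len(x), x))
    some (PySem.List.sorted2 (ans ++ subs) (fun x => PySem.Str.len x) (fun x => x) false)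

-- ===== PRECONDITION & SPEC =====
def Spec_powerset2 (temp_p : String) (temp_up : String) (ans : List String) (out : Option (List String)) : Prop := out = powerset2_alt temp_p temp_up ans
instance (temp_p : String) (temp_up : String) (ans : List String) (out : Option (List String)) : Decidable (Spec_powerset2 temp_p temp_up ans out) := by unfold Spec_powerset2; infer_instance

-- ===== CLAIM (what is proved, stated in full; the proofs are below) =====
def Claim_equal_powerset2 : Prop := ∀ (temp_p : String) (temp_up : String) (ans : List String), Dom_powerset2 temp_p temp_up ans → Spec_powerset2 temp_p temp_up ans (powerset2 temp_p temp_up ans)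

-- ===== LEMMAS AND PROOFS =====

-- the length-then-lexicographic order both final sorts realise
def pvR (a b : String) : Prop :=
  PySem.Str.len a < PySem.Str.len b ∨ (PySem.Str.len a = PySem.Str.len b ∧ a ≤ b)

theorem pvR_trans {a b c : String} (h1 : pvR a b) (h2 : pvR b c) : pvR a c := by
  unfold pvR at *
  rcases h1 with h1 | ⟨h1, h1'⟩ <;> rcases h2 with h2 | ⟨h2, h2'⟩
  · exact Or.inl (h1.trans h2)
  · exact Or.inl (h2 ▸ h1)
  · exact Or.inl (h1 ▸ h2)
  · exact Or.inr ⟨h1.trans h2, le_trans h1' h2'⟩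

theorem pvR_antisymm {a b : String} (h1 : pvR a b) (h2 : pvR b a) : a = b := by
  unfold pvR at *
  rcases h1 with h1 | ⟨h1, h1'⟩ <;> rcases h2 with h2 | ⟨h2, h2'⟩ <;> try omega
  exact le_antisymm h1' h2'

-- inserting y into a pvR-Pairwise list keeps it pvR-Pairwise, provided the Bool comparison is
-- compatible with pvR on the elements of the list
theorem insertBy_pairwise_pvR (bl : String → String → Bool) (y : String) (acc : List String)
    (hacc : acc.Pairwise pvR)
    (hyz : ∀ z ∈ acc, bl y z = true → pvR y z)
    (hzy : ∀ z ∈ acc, bl y z = false → pvR z y) :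
    (PySem.List.insertBy bl y acc).Pairwise pvR := by
  induction acc with
  | nil => simp [PySem.List.insertBy]
  | cons z zs ih =>
    rcases List.pairwise_cons.mp hacc with ⟨hz, hzs⟩
    by_cases hb : bl y z = true
    · simp only [PySem.List.insertBy, hb, if_true]
      refine List.pairwise_cons.mpr ⟨?_, List.pairwise_cons.mpr ⟨hz, hzs⟩⟩
      intro w hw
      rcases List.mem_cons.mp hw with rfl | hw
      · exact hyz w (List.mem_cons_self) hb
      · exact pvR_trans (hyz z List.mem_cons_self hb) (hz w hw)
    · simp only [PySem.List.insertBy, hb]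
      refine List.pairwise_cons.mpr ⟨?_, ?_⟩
      · intro w hw
        rcases (PySem.List.mem_insertBy bl y w zs).mp hw with rfl | hw
        · exact hzy z List.mem_cons_self (eq_false_of_ne_true hb)
        · exact hz w hw
      · exact ih hzs (fun z hz hb => hyz z (List.mem_cons_of_mem _ hz) hb)
                     (fun z hz hb => hzy z (List.mem_cons_of_mem _ hz) hb)

-- A's second sort: insertion-sorting a lexicographically sorted list by length is stable,
-- so the result is Pairwise pvR.  The cross invariant records stability.
theorem foldl_insert_len_pairwise (ys acc : List String)
    (hys : ys.Pairwise (· ≤ ·)) (hacc : acc.Pairwise pvR)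
    (hcross : ∀ a ∈ acc, ∀ y ∈ ys, PySem.Str.len a = PySem.Str.len y → a ≤ y) :
    (ys.foldl (fun acc x =>
        PySem.List.insertBy (fun a b => decide (PySem.Str.len a < PySem.Str.len b)) x acc) acc).Pairwise pvR := by
  induction ys generalizing acc with
  | nil => exact hacc
  | cons y t ih =>
    rcases List.pairwise_cons.mp hys with ⟨hy, ht⟩
    simp only [List.foldl_cons]
    refine ih _ ht ?_ ?_
    · refine insertBy_pairwise_pvR _ y acc hacc ?_ ?_
      · intro z _ hb
        exact Or.inl (by simpa using hb)
      · intro z hz hb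
        have hle : PySem.Str.len z ≤ PySem.Str.len y := by simpa using hb
        rcases lt_or_eq_of_le hle with h | h
        · exact Or.inl h
        · exact Or.inr ⟨h, hcross z hz y List.mem_cons_self h⟩
    · intro a ha w hw
      rcases (PySem.List.mem_insertBy _ y a acc).mp ha with rfl | ha
      · exact fun _ => hy w hw
      · exact hcross a ha w (List.mem_cons_of_mem _ hw)

-- B's single sort with the (len, lex) tuple key is Pairwise pvR outright (its comparison is total for pvR)
theorem foldl_insert2_pairwise (xs acc : List String) (hacc : acc.Pairwise pvR) :
    (xs.foldl (fun acc x => PySem.List.insertBy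
        (fun a b => decide (PySem.Str.len a < PySem.Str.len b) ||
                    (!decide (PySem.Str.len b < PySem.Str.len a) && decide (a < b))) x acc) acc).Pairwise pvR := by
  induction xs generalizing acc with
  | nil => exact hacc
  | cons y t ih =>
    simp only [List.foldl_cons]
    refine ih _ (insertBy_pairwise_pvR _ y acc hacc ?_ ?_)
    · intro z _ hb
      simp only [Bool.or_eq_true, Bool.and_eq_true, Bool.not_eq_true', decide_eq_true_eq,
        decide_eq_false_iff_not] at hb
      rcases hb with h | ⟨h1, h2⟩
      · exact Or.inl h
      · rcases lt_or_eq_of_le (not_lt.mp h1) with h | h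
        · exact Or.inl h
        · exact Or.inr ⟨h, le_of_lt h2⟩
    · intro z _ hb
      simp only [Bool.or_eq_false_iff, Bool.and_eq_false_iff, Bool.not_eq_false',
        decide_eq_false_iff_not, decide_eq_true_eq] at hb
      rcases hb with ⟨h1, h2⟩
      rcases lt_or_eq_of_le (not_lt.mp h1) with h | h
      · exact Or.inl h
      · refine Or.inr ⟨h, ?_⟩
        rcases h2 with h2 | h2
        · omega
        · exact not_lt.mp h2

-- A's recursion only ever appends to `ans`: its effect is `ans ++` a DFS list of subsets
def pvDFS (p : String) (up : List Char) : List String :=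
  match up with
  | [] => [p]
  | c :: rest => pvDFS p rest ++ pvDFS (p.push c) rest

theorem powerset2Go_eq (p : String) (up : List Char) (ans : List String) :
    powerset2Go p up ans = ans ++ pvDFS p up := by
  induction up generalizing p ans with
  | nil => rfl
  | cons c rest ih =>
    simp [powerset2Go, pvDFS, ih, List.append_assoc]

-- interchange: one flatMap of concatenations is a permutation of the concatenation of two flatMaps
theorem flatMap_append_perm {α β : Type} (l : List α) (f g : α → List β) :
    (l.flatMap (fun x => f x ++ g x)).Perm (l.flatMap f ++ l.flatMap g) := by
  induction l with
  | nil => simp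
  | cons x t ih =>
    simp only [List.flatMap_cons]
    refine (List.Perm.append_left _ ih).trans ?_
    simp only [List.append_assoc]
    exact List.Perm.append_left (f x) (List.perm_append_comm_assoc _ _ _)

-- B's doubling loop produces (a permutation of) the DFS subset lists of its seeds
theorem foldl_double_perm (up : List Char) (init : List String) :
    (up.foldl (fun acc c => acc ++ acc.map (fun s => s.push c)) init).Perm
      (init.flatMap (fun s => pvDFS s up)) := by
  induction up generalizing init with
  | nil => simp [pvDFS]
  | cons c rest ih =>
    simp only [List.foldl_cons]
    refine (ih _).trans ?_
    have h1 : ((init ++ init.map (fun s => s.push c)).flatMap (fun s => pvDFS s rest)) =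
        init.flatMap (fun s => pvDFS s rest) ++ init.flatMap (fun s => pvDFS (s.push c) rest) := by
      simp [List.flatMap_append, List.flatMap_map]
    rw [h1]
    exact (flatMap_append_perm init (fun s => pvDFS s rest) (fun s => pvDFS (s.push c) rest)).symm

theorem powerset2_spec_aux (temp_p temp_up : String) (ans : List String) :
    powerset2 temp_p temp_up ans = powerset2_alt temp_p temp_up ans := by
  unfold powerset2 powerset2_alt
  by_cases h : PySem.Str.len temp_up = 0
  · rw [if_pos h, if_pos h]
  · rw [if_neg h, if_neg h]
    congr 1
    set ansA := powerset2Go temp_p temp_up.toList ans with hA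
    set subs := temp_up.toList.foldl (fun acc c => acc ++ acc.map (fun s => s.push c)) [temp_p] with hB
    have hperm : ansA.Perm (ans ++ subs) := by
      rw [hA, powerset2Go_eq]
      refine List.Perm.append_left ans ?_
      have := foldl_double_perm temp_up.toList [temp_p]
      simpa using this.symm
    -- both sides are Pairwise pvR and permutations of each other
    have hL1 : (PySem.List.sorted (PySem.List.sorted ansA (fun x => x) false)
        (fun x => PySem.Str.len x) false).Pairwise pvR := by
      rw [PySem.List.sorted_eq_foldl_insertBy]
      refine foldl_insert_len_pairwise _ [] ?_ (by simp) (by simp)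
      simpa using PySem.List.sorted_pairwise ansA (fun x => x)
    have hL2 : (PySem.List.sorted2 (ans ++ subs) (fun x => PySem.Str.len x) (fun x => x) false).Pairwise pvR := by
      have h2 : PySem.List.sorted2 (ans ++ subs) (fun x => PySem.Str.len x) (fun x => x) false =
          (ans ++ subs).foldl (fun acc x => PySem.List.insertBy
            (fun a b => decide (PySem.Str.len a < PySem.Str.len b) ||
              (!decide (PySem.Str.len b < PySem.Str.len a) && decide (a < b))) x acc) [] := rfl
      rw [h2]
      exact foldl_insert2_pairwise _ [] (by simp)
    have hp : (PySem.List.sorted (PySem.List.sorted ansA (fun x => x) false)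
        (fun x => PySem.Str.len x) false).Perm
        (PySem.List.sorted2 (ans ++ subs) (fun x => PySem.Str.len x) (fun x => x) false) := by
      refine ((PySem.List.sorted_perm _ _ _).trans ((PySem.List.sorted_perm _ _ _).trans hperm)).trans ?_
      exact (PySem.List.sorted2_perm _ _ _ _).symm
    exact List.Perm.eq_of_pairwise (fun a b _ _ h1 h2 => pvR_antisymm h1 h2) hL1 hL2 hp

-- ===== VERDICT (by name: the statement is the Claim_ definition above) =====
theorem powerset2_spec : Claim_equal_powerset2 := by
  intro temp_p temp_up ans _
  exact powerset2_spec_aux temp_p temp_up ans
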